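-- pv_equiv track=rewrite | github.com/kachofugetsu09/akashic-agent | proactive/memory_optimizer.py | _remove_items_from_section
-- ===== SOURCE A (Python) =====
-- def _remove_items_from_section(text: str, section_header: str, items_to_remove: list[str]) -> str:
--     """从 NOW.md 指定 section 中删除匹配的 bullet 条目。"""
--     if not items_to_remove:
--         return text
--     lines = text.splitlines(keepends=True)
--     result = []
--     in_section = False
--     for line in lines:
--         stripped = line.strip()
--         if stripped.startswith("## "):
--             in_section = stripped == section_header.strip()
--         if in_section and stripped.startswith("- "):
--             item_text = stripped[2:].strip()
--             if any(item_text in r or r in item_text for r in items_to_remove):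
--                 continue  # 删除该条目
--         result.append(line)
--     return "".join(result)
-- ===== SOURCE B (Python) =====
-- def _remove_items_from_section(text: str, section_header: str, items_to_remove: list[str]) -> str:
--     """Two-pass rewrite: split lines into (header, body) segments at '## ' lines,
--     then rebuild, filtering bullets only inside segments whose header matches."""
--     if not items_to_remove:
--         return text
--     target = section_header.strip()
--
--     # pass 1: partition the keepends lines into segments
--     segments = []
--     cur_header, cur_body = None, []
--     for line in text.splitlines(keepends=True):
--         if line.strip().startswith("## "):
--             segments.append((cur_header, cur_body))
--             cur_header, cur_body = line, []
--         else:
--             cur_body.append(line)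
--     segments.append((cur_header, cur_body))
--
--     def keep(line):
--         s = line.strip()
--         if s.startswith("- "):
--             it = s[2:].strip()
--             return not any(it in r or r in it for r in items_to_remove)
--         return True
--
--     # pass 2: rebuild
--     out = []
--     for header, body in segments:
--         if header is None:
--             out.extend(body)
--         else:
--             out.append(header)
--             out.extend([l for l in body if keep(l)] if header.strip() == target else body)
--     return "".join(out)
-- ===== Notes on version B (the rewrite author's own statement) =====
-- stated objective: alternative
-- what changed: Replaces A's single stateful scan (an in_section flag toggled per line) with a two-pass decomposition: first partition the keepends lines into (header, body) segments at every '## ' line, then rebuild the text, filtering bullet lines only in segments whose header matches.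
import Mathlib
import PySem

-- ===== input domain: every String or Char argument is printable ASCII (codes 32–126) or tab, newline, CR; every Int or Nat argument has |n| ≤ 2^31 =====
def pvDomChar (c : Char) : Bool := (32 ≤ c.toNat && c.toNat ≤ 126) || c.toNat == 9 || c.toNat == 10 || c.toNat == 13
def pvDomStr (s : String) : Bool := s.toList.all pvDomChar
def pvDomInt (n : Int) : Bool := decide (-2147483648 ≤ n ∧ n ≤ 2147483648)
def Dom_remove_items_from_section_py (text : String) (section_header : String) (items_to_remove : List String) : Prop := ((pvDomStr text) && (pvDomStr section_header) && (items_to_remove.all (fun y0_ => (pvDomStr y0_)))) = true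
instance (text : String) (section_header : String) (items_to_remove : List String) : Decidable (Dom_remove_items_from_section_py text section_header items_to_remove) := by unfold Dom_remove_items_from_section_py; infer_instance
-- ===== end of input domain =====

-- B replaces A's single stateful scan (in_section flag) with a two-pass decomposition:
-- partition lines into header/body segments, then rebuild with per-segment filtering (alternative, same cost).


-- Shared helper: text.splitlines(keepends=True). Hand-ported (PySem.Str.splitlines drops the ends);
-- exact on the Dom alphabet, where the only line breaks are '\n', '\r' and '\r\n'.
def pvSplitKeep (cur : List Char) : List Char → List (List Char)
  | [] => if cur = [] then [] else [cur]
  | '\r' :: '\n' :: rest => (cur ++ ['\r', '\n']) :: pvSplitKeep [] rest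
  | c :: rest =>
    if c = '\n' ∨ c = '\r' then (cur ++ [c]) :: pvSplitKeep [] rest
    else pvSplitKeep (cur ++ [c]) rest

def pvLines (text : String) : List String :=
  (pvSplitKeep [] text.toList).map String.ofList

-- ===== PORT A =====
-- A's loop: one pass, carrying the in_section flag (section_header.strip() hoisted to `target`).
def pvAloop (target : String) (items : List String) : Bool → List String → List String
  | _, [] => []
  | inSection, line :: rest =>
    let stripped := PySem.Str.strip line
    let inSection' := if PySem.Str.startswith stripped "## " then stripped == target else inSection
    if inSection' && PySem.Str.startswith stripped "- " then
      let itemText := PySem.Str.strip (PySem.Str.slice stripped (some 2) none)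
      if items.any (fun r => PySem.Str.isIn itemText r || PySem.Str.isIn r itemText) then
        pvAloop target items inSection' rest
      else line :: pvAloop target items inSection' rest
    else line :: pvAloop target items inSection' rest

def remove_items_from_section_py (text : String) (section_header : String) (items_to_remove : List String) : String :=
  if items_to_remove = [] then text
  else PySem.Str.join "" (pvAloop (PySem.Str.strip section_header) items_to_remove false (pvLines text))

-- ===== PORT B =====
-- B pass 1: partition the lines into segments (header_line_or_None, body_lines), split at '## ' lines.
def pvSegs (curH : Option String) (curB : List String) : List String → List (Option String × List String)
  | [] => [(curH, curB)]
  | line :: rest =>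
    if PySem.Str.startswith (PySem.Str.strip line) "## " then
      (curH, curB) :: pvSegs (some line) [] rest
    else pvSegs curH (curB ++ [line]) rest

-- B's `keep` predicate on a body line.
def pvKeepLine (items : List String) (line : String) : Bool :=
  if PySem.Str.startswith (PySem.Str.strip line) "- " then
    !(items.any (fun r =>
      PySem.Str.isIn (PySem.Str.strip (PySem.Str.slice (PySem.Str.strip line) (some 2) none)) r ||
      PySem.Str.isIn r (PySem.Str.strip (PySem.Str.slice (PySem.Str.strip line) (some 2) none))))
  else true

-- B pass 2: rebuild, filtering only the bodies of matching segments.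
def pvRender (target : String) (items : List String) : List (Option String × List String) → List String
  | [] => []
  | (h, body) :: rest =>
    (match h with
     | none => body
     | some hl => hl :: (if PySem.Str.strip hl == target then body.filter (pvKeepLine items) else body))
    ++ pvRender target items rest

def remove_items_from_section_py_alt (text : String) (section_header : String) (items_to_remove : List String) : String :=
  if items_to_remove = [] then text
  else PySem.Str.join ""
    (pvRender (PySem.Str.strip section_header) items_to_remove
      (pvSegs none [] (pvLines text)))

-- ===== PRECONDITION & SPEC =====
def Spec_remove_items_from_section_py (text : String) (section_header : String) (items_to_remove : List String) (out : String) : Prop := out = remove_items_from_section_py_alt text section_header items_to_remove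
instance (text : String) (section_header : String) (items_to_remove : List String) (out : String) : Decidable (Spec_remove_items_from_section_py text section_header items_to_remove out) := by unfold Spec_remove_items_from_section_py; infer_instance

-- ===== CLAIM (what is proved, stated in full; the proofs are below) =====
def Claim_equal_remove_items_from_section_py : Prop := ∀ (text : String) (section_header : String) (items_to_remove : List String), Dom_remove_items_from_section_py text section_header items_to_remove → Spec_remove_items_from_section_py text section_header items_to_remove (remove_items_from_section_py text section_header items_to_remove)

-- ===== LEMMAS AND PROOFS =====

-- the flag A carries for the segment opened by header curH
def pvFlag (target : String) : Option String → Bool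
  | none => false
  | some hl => PySem.Str.strip hl == target

-- what pvRender emits for the pending segment (curH, curB)
def pvEmit (target : String) (items : List String) (curH : Option String) (curB : List String) : List String :=
  match curH with
  | none => curB
  | some hl => hl :: (if PySem.Str.strip hl == target then curB.filter (pvKeepLine items) else curB)

theorem pv_not_dash (s : String) (h : PySem.Str.startswith s "## " = true) :
    PySem.Str.startswith s "- " = false := by
  by_contra hb
  rw [Bool.not_eq_false] at hb
  rw [PySem.Str.startswith_eq, PySem.Chars.startswith_iff] at h hb
  rcases List.prefix_or_prefix_of_prefix h hb with hc | hc
  · have := hc.length_le; simp at this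
  · rcases hc with ⟨u, hu⟩
    have : ("- ".toList ++ u).length = ("## ".toList).length := by rw [hu]
    rcases u with _ | ⟨x, t⟩
    · simp at hu
    · simp at this
      rcases t with _ | _
      · simp at hu
      · simp at this

theorem pv_render_segs (target : String) (items : List String) :
    ∀ (lines : List String) (curH : Option String) (curB : List String),
      pvRender target items (pvSegs curH curB lines) =
        pvEmit target items curH curB ++ pvAloop target items (pvFlag target curH) lines := by
  intro lines
  induction lines with
  | nil =>
    intro curH curB
    cases curH <;> simp [pvSegs, pvRender, pvEmit, pvAloop]
  | cons line rest ih =>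
    intro curH curB
    by_cases hh : PySem.Str.startswith (PySem.Str.strip line) "## " = true
    · have hnd := pv_not_dash _ hh
      rw [pvSegs, if_pos hh]
      simp only [pvRender]
      rw [ih (some line) []]
      have hA : pvAloop target items (pvFlag target curH) (line :: rest) =
          line :: pvAloop target items (pvFlag target (some line)) rest := by
        simp only [pvAloop, pvFlag]
        rw [hh, hnd]
        simp
      rw [hA]
      cases curH <;> simp [pvEmit, pvFlag]
    · rw [pvSegs, if_neg hh]
      rw [ih curH (curB ++ [line])]
      cases hcf : pvFlag target curH with
      | false =>
        have hA : pvAloop target items false (line :: rest) =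
            line :: pvAloop target items false rest := by
          simp only [pvAloop]
          rw [if_neg hh]
          simp
        rw [hA]
        cases curH with
        | none => simp [pvEmit]
        | some hl =>
          simp only [pvFlag] at hcf
          simp [pvEmit, hcf]
      | true =>
        cases hk : pvKeepLine items line with
        | true =>
          have hA : pvAloop target items true (line :: rest) =
              line :: pvAloop target items true rest := by
            unfold pvKeepLine at hk
            simp only [pvAloop]
            rw [if_neg hh]
            by_cases hd : PySem.Str.startswith (PySem.Str.strip line) "- " = true
            · rw [hd] at hk
              simp only [if_true] at hk
              rw [Bool.not_eq_true'] at hk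
              simp only [Bool.true_and, hd, hk, Bool.false_eq_true, if_true, if_false]
            · rw [Bool.not_eq_true] at hd
              simp only [Bool.true_and, hd, Bool.false_eq_true, if_false]
          rw [hA]
          cases curH with
          | none => simp [pvFlag] at hcf
          | some hl =>
            simp only [pvFlag] at hcf
            simp [pvEmit, hcf, List.filter_append, hk]
        | false =>
          have hA : pvAloop target items true (line :: rest) =
              pvAloop target items true rest := by
            unfold pvKeepLine at hk
            simp only [pvAloop]
            rw [if_neg hh]
            by_cases hd : PySem.Str.startswith (PySem.Str.strip line) "- " = true
            · rw [hd] at hk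
              simp only [if_true] at hk
              rw [Bool.not_eq_false'] at hk
              simp only [Bool.true_and, hd, hk, if_true]
            · rw [Bool.not_eq_true] at hd
              rw [hd] at hk
              simp at hk
          rw [hA]
          cases curH with
          | none => simp [pvFlag] at hcf
          | some hl =>
            simp only [pvFlag] at hcf
            simp [pvEmit, hcf, List.filter_append, hk]

-- ===== VERDICT (by name: the statement is the Claim_ definition above) =====
theorem remove_items_from_section_py_spec : Claim_equal_remove_items_from_section_py := by
  intro text section_header items_to_remove _
  unfold Spec_remove_items_from_section_py
  unfold remove_items_from_section_py remove_items_from_section_py_alt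
  by_cases he : items_to_remove = []
  · simp [he]
  · rw [if_neg he, if_neg he]
    rw [pv_render_segs]
    simp [pvEmit, pvFlag]
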